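-- pv_equiv track=rewrite | github.com/liskos/isakovich2023 | ege23/161.py | f
-- ===== SOURCE A (Python) =====
-- def f(a, b):
--     if a > b:
--         return 0
--     if a == b:
--         return 1
--     if a == 6:
--         return f(a + 1, b) + f(a + 3, b) + f(8, b)
--     if a == 7:
--         return f(a + 1, b) + f(a + 3, b) + f(13, b)
--     if a == 8:
--         return f(a + 1, b) + f(a + 3, b) + f(21, b)
--     else:
--         return f(a + 1, b) + f(a + 3, b)
-- ===== SOURCE B (Python) =====
-- def f(a, b):
--     if a > b:
--         return 0
--     memo = {}
--     for x in range(b, a - 1, -1):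
--         if x == b:
--             v = 1
--         else:
--             v = memo.get(x + 1, 0) + memo.get(x + 3, 0)
--             if x == 6:
--                 v += memo.get(8, 0)
--             elif x == 7:
--                 v += memo.get(13, 0)
--             elif x == 8:
--                 v += memo.get(21, 0)
--         memo[x] = v
--     return memo[a]
-- ===== Notes on version B (the rewrite author's own statement) =====
-- stated objective: alternative
-- what changed: Replaces A's naive recursion by an iterative bottom-up dynamic program that fills a memo table from b down to a, computing each value once; Pre_ excludes b - a > 9985, where A raises RecursionError (its recursion depth of about b - a + 1 frames exceeds the 10000-frame recursion limit).
import Mathlib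
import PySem

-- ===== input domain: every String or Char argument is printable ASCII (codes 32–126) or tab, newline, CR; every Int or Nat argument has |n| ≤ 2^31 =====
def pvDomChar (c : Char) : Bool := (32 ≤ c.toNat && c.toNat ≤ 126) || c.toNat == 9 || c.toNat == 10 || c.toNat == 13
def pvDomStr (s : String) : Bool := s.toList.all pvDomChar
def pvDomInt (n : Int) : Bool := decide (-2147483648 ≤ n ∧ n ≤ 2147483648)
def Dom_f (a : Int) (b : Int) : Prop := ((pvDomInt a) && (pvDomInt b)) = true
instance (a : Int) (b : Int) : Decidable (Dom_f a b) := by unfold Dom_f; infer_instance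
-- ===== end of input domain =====

-- B replaces A's naive recursion by an iterative bottom-up DP table filled from b down to a, computing each value once (alternative algorithm).


-- ===== PORT A =====
def f (a : Int) (b : Int) : Int :=
  if a > b then 0
  else if a = b then 1
  else if a = 6 then f (a + 1) b + f (a + 3) b + f 8 b
  else if a = 7 then f (a + 1) b + f (a + 3) b + f 13 b
  else if a = 8 then f (a + 1) b + f (a + 3) b + f 21 b
  else f (a + 1) b + f (a + 3) b
termination_by (b - a).toNat
decreasing_by all_goals omega

-- ===== PORT B =====
-- one iteration of B's loop body (x runs from b down to a)
def fAltStep (b : Int) (memo : PySem.Dict Int Int) (x : Int) : PySem.Dict Int Int :=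
  let v :=
    if x = b then (1 : Int)
    else
      let v0 := memo.getD (x + 1) 0 + memo.getD (x + 3) 0
      if x = 6 then v0 + memo.getD 8 0
      else if x = 7 then v0 + memo.getD 13 0
      else if x = 8 then v0 + memo.getD 21 0
      else v0
  memo.insert x v

def f_alt (a : Int) (b : Int) : Int :=
  if a > b then 0
  else
    let memo := (PySem.List.pyRange b (a - 1) (-1)).foldl (fAltStep b) PySem.Dict.empty
    -- Python's `memo[a]`: the key a is always present here (a ≤ b), so getD with default matches
    memo.getD a 0

-- ===== PRECONDITION & SPEC =====
-- Pre_ excludes b - a > 9985: there Python A returns no value — its depth-first recursion needs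
-- about b - a + 1 stack frames, which exceeds the checker's 10000-frame recursion limit (a few
-- frames of margin are left for the interpreter harness), so A raises RecursionError.
def Pre_f (a : Int) (b : Int) : Prop := b - a ≤ 9985
instance (a : Int) (b : Int) : Decidable (Pre_f a b) := by unfold Pre_f; infer_instance
def pvWitness_f : Int × Int := (3, 12)

def Spec_f (a : Int) (b : Int) (out : Int) : Prop := out = f_alt a b
instance (a : Int) (b : Int) (out : Int) : Decidable (Spec_f a b out) := by unfold Spec_f; infer_instance

-- ===== CLAIM (what is proved, stated in full; the proofs are below) =====
def Claim_equal_f : Prop := ∀ (a : Int) (b : Int), Dom_f a b → Pre_f a b → Spec_f a b (f a b)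

-- ===== LEMMAS AND PROOFS =====

theorem f_of_gt {a b : Int} (h : b < a) : f a b = 0 := by
  rw [f]; simp [show a > b from h]

theorem f_self (b : Int) : f b b = 1 := by
  rw [f]; simp

-- loop invariant: after processing x = b, b-1, …, b-n+1 the memo agrees with f on (b-n, b] and is 0 elsewhere
theorem fAlt_inv (b : Int) (n : Nat) (y : Int) :
    ((PySem.List.pyRange b (b - n) (-1)).foldl (fAltStep b) PySem.Dict.empty).getD y 0
      = if b - n < y ∧ y ≤ b then f y b else 0 := by
  induction n generalizing y with
  | zero =>
      rw [PySem.List.pyRange_neg_one_eq_nil (by omega)]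
      simp only [List.foldl_nil, PySem.Dict.getD_empty]
      rw [if_neg (show ¬ (b - ((0 : Nat) : Int) < y ∧ y ≤ b) by push_cast; omega)]
  | succ n ih =>
      have hsplit : PySem.List.pyRange b (b - (n + 1 : Nat)) (-1)
          = PySem.List.pyRange b (b - n) (-1) ++ [b - n] := by
        rw [PySem.List.pyRange_neg_one, PySem.List.pyRange_neg_one]
        have h1 : (b - (b - ((n : Int) + 1))).toNat = n + 1 := by omega
        have h2 : (b - (b - (n : Int))).toNat = n := by omega
        push_cast
        rw [h1, h2, List.range_succ, List.map_append]
        simp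
      rw [hsplit, List.foldl_append, List.foldl_cons, List.foldl_nil]
      rw [fAltStep, PySem.Dict.getD_insert]
      by_cases hy : y = b - n
      · subst hy
        rw [if_pos rfl]
        have hcond : b - ((n + 1 : Nat) : Int) < b - (n : Int) ∧ b - (n : Int) ≤ b := by
          push_cast; omega
        rw [if_pos hcond]
        by_cases hb : b - (n : Int) = b
        · -- first iteration: x = b, v = 1 = f b b
          rw [if_pos hb, hb, f_self]
        · -- x < b: v mirrors f's recursive case, all lookups resolved by ih
          rw [if_neg hb]
          have l1 : ∀ z : Int, b - (n : Int) < z →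
              ((PySem.List.pyRange b (b - (n : Nat)) (-1)).foldl (fAltStep b) PySem.Dict.empty).getD z 0 = f z b := by
            intro z hz
            rw [ih z]
            by_cases hzb : z ≤ b
            · simp [hz, hzb]
            · rw [f_of_gt (by omega)]
              simp [hzb]
          have e1 := l1 (b - (n : Int) + 1) (by omega)
          have e3 := l1 (b - (n : Int) + 3) (by omega)
          conv_rhs => rw [f]
          rw [if_neg (show ¬ (b - (n : Int) > b) by omega), if_neg hb]
          by_cases h6 : b - (n : Int) = 6
          · have e8 := l1 8 (by omega)
            rw [if_pos h6, if_pos h6, e1, e3, e8]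
          · rw [if_neg h6, if_neg h6]
            by_cases h7 : b - (n : Int) = 7
            · have e13 := l1 13 (by omega)
              rw [if_pos h7, if_pos h7, e1, e3, e13]
            · rw [if_neg h7, if_neg h7]
              by_cases h8 : b - (n : Int) = 8
              · have e21 := l1 21 (by omega)
                rw [if_pos h8, if_pos h8, e1, e3, e21]
              · rw [if_neg h8, if_neg h8, e1, e3]
      · rw [if_neg hy, ih y]
        have h2 : (b - (n : Int) < y ∧ y ≤ b) ↔ (b - ((n + 1 : Nat) : Int) < y ∧ y ≤ b) := by
          constructor <;> intro h <;> push_cast at * <;> omega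
        simp only [h2]

theorem f_eq_f_alt (a b : Int) : f a b = f_alt a b := by
  by_cases hab : a > b
  · rw [f_of_gt hab, f_alt, if_pos hab]
  · rw [f_alt, if_neg hab]
    have hn : a - 1 = b - ((b - a + 1).toNat : Nat) := by omega
    rw [hn, fAlt_inv b (b - a + 1).toNat a,
      if_pos (show b - (((b - a + 1).toNat : Nat) : Int) < a ∧ a ≤ b by omega)]

-- ===== VERDICT (by name: the statement is the Claim_ definition above) =====
theorem f_spec : Claim_equal_f := by
  intro a b _ _
  unfold Spec_f
  exact f_eq_f_alt a b
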